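-- pv_equiv track=rewrite | github.com/marosmester/ALP_course | semestral_project/player.py | orderedStones
-- ===== SOURCE A (Python) =====
-- def orderedStones(stones, parameter):
--     orderedStones=[]
--     cnt=0
--     for kamen in stones:
--         coords=kamen[1]
--         rows=[]
--         cols=[]
--         for i in coords:
--             rows.append(i[0])
--         for j in coords:
--             cols.append(j[1])
--         rowdif=0-min(rows)
--         coldif=0-min(cols)
--         vyska=max(rows)-min(rows)+1
--         sirka=max(cols)-min(cols)+1
--         movedStone=[kamen[0], [ [ k[0]+rowdif, k[1]+coldif ] for k in coords], [sirka, vyska], cnt ]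
--         orderedStones.append(movedStone)
--         cnt+=1
--     orderedStones.sort(key=lambda x: x[2][parameter], reverse=True)
--     reordIndexes= [ i[3] for i in orderedStones ]
--     orderedStones= [ i[:3] for i in orderedStones ]
--     return orderedStones, reordIndexes
-- ===== SOURCE B (Python) =====
-- def orderedStones(stones, parameter):
--     # normalize each stone: one running-min/max pass over its coords
--     moved = []
--     for stone in stones:
--         coords = stone[1]
--         rmin = rmax = coords[0][0]
--         cmin = cmax = coords[0][1]
--         for c in coords:
--             if c[0] < rmin: rmin = c[0]
--             if c[0] > rmax: rmax = c[0]
--             if c[1] < cmin: cmin = c[1]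
--             if c[1] > cmax: cmax = c[1]
--         moved.append([stone[0],
--                       [[c[0] - rmin, c[1] - cmin] for c in coords],
--                       [cmax - cmin + 1, rmax - rmin + 1]])
--     # bucket the stone indices by their chosen dimension, then emit the
--     # buckets by descending key (stable: each bucket keeps original order)
--     groups = {}
--     for i, m in enumerate(moved):
--         groups.setdefault(m[2][parameter], []).append(i)
--     ordered, idxs = [], []
--     for k in sorted(groups, reverse=True):
--         for i in groups[k]:
--             ordered.append(moved[i])
--             idxs.append(i)
--     return ordered, idxs
-- ===== Notes on version B (the rewrite author's own statement) =====
-- stated objective: alternative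
-- what changed: A augments each record with a running counter and stable-sorts the augmented records; B normalizes each stone with a single running min/max pass, buckets the stone indices by their chosen dimension in a dict, and emits the buckets by descending key (stability falls out of bucket order), so no record sort happens at all.
import Mathlib
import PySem

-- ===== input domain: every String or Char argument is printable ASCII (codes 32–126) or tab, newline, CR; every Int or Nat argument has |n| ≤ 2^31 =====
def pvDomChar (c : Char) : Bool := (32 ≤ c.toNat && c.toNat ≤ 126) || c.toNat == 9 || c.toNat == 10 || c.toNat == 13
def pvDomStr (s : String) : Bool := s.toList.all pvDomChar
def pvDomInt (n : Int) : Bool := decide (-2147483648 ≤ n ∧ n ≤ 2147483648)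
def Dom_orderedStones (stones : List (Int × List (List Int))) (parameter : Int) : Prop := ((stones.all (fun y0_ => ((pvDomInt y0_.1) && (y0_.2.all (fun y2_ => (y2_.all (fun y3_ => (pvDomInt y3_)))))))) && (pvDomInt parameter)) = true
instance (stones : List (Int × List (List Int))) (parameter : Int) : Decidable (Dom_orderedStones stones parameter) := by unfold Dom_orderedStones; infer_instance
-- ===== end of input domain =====

-- B replaces A's "augment with a counter, stable-sort the records, slice the counter off" by a
-- bucket-by-key pass: per-stone running min/max, a dict grouping stone indices by the chosen
-- dimension, and emission of the buckets by descending key (alternative decomposition, same cost).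


-- ===== PORT A =====
-- per-stone body of A's loop: rows/cols collected by append, min/max of the lists, shifted coords
-- (Python's i[0]/j[1]/min/max raise on too-short/empty lists; those inputs are excluded by Pre_,
--  so the pyGetD/getD defaults are never reached on admitted inputs)
def pvRecA (kamen : Int × List (List Int)) : Int × List (List Int) × List Int :=
  let coords := kamen.2
  let rows := coords.foldl (fun acc i => acc ++ [PySem.List.pyGetD i 0 0]) []
  let cols := coords.foldl (fun acc j => acc ++ [PySem.List.pyGetD j 1 0]) []
  let rowdif := 0 - ((PySem.List.min? rows (fun x => x)).getD 0)
  let coldif := 0 - ((PySem.List.min? cols (fun x => x)).getD 0)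
  let vyska := ((PySem.List.max? rows (fun x => x)).getD 0) - ((PySem.List.min? rows (fun x => x)).getD 0) + 1
  let sirka := ((PySem.List.max? cols (fun x => x)).getD 0) - ((PySem.List.min? cols (fun x => x)).getD 0) + 1
  (kamen.1, coords.map (fun k => [PySem.List.pyGetD k 0 0 + rowdif, PySem.List.pyGetD k 1 0 + coldif]), [sirka, vyska])

-- A's 4-field record [id, coords, dims, cnt] is represented as ((id, coords, dims), cnt);
-- the final 'i[:3]' slice is the first projection, 'i[3]' the second
def orderedStones (stones : List (Int × List (List Int))) (parameter : Int) : (List (Int × List (List Int) × List Int)) × List Int :=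
  let built := stones.foldl
    (fun (st : List ((Int × List (List Int) × List Int) × Int) × Int) kamen =>
      (st.1 ++ [(pvRecA kamen, st.2)], st.2 + 1)) ([], 0)
  let srt := PySem.List.sorted built.1 (fun x => PySem.List.pyGetD x.1.2.2 parameter 0) true
  (srt.map (fun x => x.1), srt.map (fun x => x.2))

-- ===== PORT B =====
-- B's per-stone normalisation: one running min/max pass over the coords
def pvRecB (stone : Int × List (List Int)) : Int × List (List Int) × List Int :=
  let coords := stone.2
  let first := PySem.List.pyGetD coords 0 []
  let r0 := PySem.List.pyGetD first 0 0
  let c0 := PySem.List.pyGetD first 1 0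
  let mm := coords.foldl
    (fun (s : (Int × Int) × (Int × Int)) c =>
      ((if PySem.List.pyGetD c 0 0 < s.1.1 then PySem.List.pyGetD c 0 0 else s.1.1,
        if s.1.2 < PySem.List.pyGetD c 0 0 then PySem.List.pyGetD c 0 0 else s.1.2),
       (if PySem.List.pyGetD c 1 0 < s.2.1 then PySem.List.pyGetD c 1 0 else s.2.1,
        if s.2.2 < PySem.List.pyGetD c 1 0 then PySem.List.pyGetD c 1 0 else s.2.2)))
    ((r0, r0), (c0, c0))
  (stone.1,
   coords.map (fun c => [PySem.List.pyGetD c 0 0 - mm.1.1, PySem.List.pyGetD c 1 0 - mm.2.1]),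
   [mm.2.2 - mm.2.1 + 1, mm.1.2 - mm.1.1 + 1])

-- default for pyGetD on moved[i]; the bucket indices are always in range
def pvDefRec : Int × List (List Int) × List Int := (0, [], [])

-- groups.setdefault(k, []).append(i)  ==  groups[k] = groups.get(k, []) + [i]  ==  Dict.modify;
-- groups[k] in the last loop is read only for k ∈ groups.keys, so getD is exact there
def orderedStones_alt (stones : List (Int × List (List Int))) (parameter : Int) : (List (Int × List (List Int) × List Int)) × List Int :=
  let moved := stones.foldl (fun acc stone => acc ++ [pvRecB stone]) []
  let groups := (PySem.List.enumerate moved).foldl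
    (fun (d : PySem.Dict Int (List Int)) p =>
      d.modify (PySem.List.pyGetD p.2.2.2 parameter 0) [] (· ++ [p.1])) PySem.Dict.empty
  let ks := PySem.List.sorted groups.keys (fun k => k) true
  ks.foldl
    (fun (st : List (Int × List (List Int) × List Int) × List Int) k =>
      (groups.getD k []).foldl
        (fun st2 i => (st2.1 ++ [PySem.List.pyGetD moved i pvDefRec], st2.2 ++ [i])) st)
    ([], [])

-- ===== PRECONDITION & SPEC =====
-- Pre_ excludes exactly the inputs where the Python A raises: a stone with an empty coordinate list
-- (min/max of an empty sequence, ValueError), a coordinate shorter than 2 entries (IndexError on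
-- i[0]/j[1]), and — when stones is nonempty, so the sort key is evaluated — a parameter outside the
-- valid indices -2..1 of the 2-element [sirka, vyska] list (IndexError).
def Pre_orderedStones (stones : List (Int × List (List Int))) (parameter : Int) : Prop :=
  (∀ kamen ∈ stones, kamen.2 ≠ [] ∧ ∀ c ∈ kamen.2, 2 ≤ c.length) ∧
  (stones = [] ∨ (-2 ≤ parameter ∧ parameter < 2))
instance (stones : List (Int × List (List Int))) (parameter : Int) : Decidable (Pre_orderedStones stones parameter) := by unfold Pre_orderedStones; infer_instance

def pvWitness_orderedStones : (List (Int × List (List Int))) × Int :=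
  ([(1, [[0, 0], [1, 2]]), (2, [[-1, 3]])], 0)

def Spec_orderedStones (stones : List (Int × List (List Int))) (parameter : Int) (out : (List (Int × List (List Int) × List Int)) × List Int) : Prop := out = orderedStones_alt stones parameter
instance (stones : List (Int × List (List Int))) (parameter : Int) (out : (List (Int × List (List Int) × List Int)) × List Int) : Decidable (Spec_orderedStones stones parameter out) := by unfold Spec_orderedStones; infer_instance

-- ===== CLAIM (what is proved, stated in full; the proofs are below) =====
def Claim_equal_orderedStones : Prop := ∀ (stones : List (Int × List (List Int))) (parameter : Int), Dom_orderedStones stones parameter → Pre_orderedStones stones parameter → Spec_orderedStones stones parameter (orderedStones stones parameter)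

-- ===== LEMMAS AND PROOFS =====

-- running min/max loop = fold of min/max over the projections
theorem pvFoldlIfLt {α : Type} (g : α → Int) (t : List α) (a : Int) :
    t.foldl (fun s c => if g c < s then g c else s) a = (t.map g).foldl min a := by
  induction t generalizing a with
  | nil => rfl
  | cons h t ih => simp only [List.foldl_cons, List.map_cons, ih]; congr 1; omega

theorem pvFoldlIfGt {α : Type} (g : α → Int) (t : List α) (a : Int) :
    t.foldl (fun s c => if s < g c then g c else s) a = (t.map g).foldl max a := by
  induction t generalizing a with
  | nil => rfl
  | cons h t ih => simp only [List.foldl_cons, List.map_cons, ih]; congr 1; omega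

-- the two per-stone transforms agree (on every input: both fall back to the same defaults)
theorem pvRecA_eq_pvRecB : pvRecA = pvRecB := by
  funext kamen
  obtain ⟨sid, coords⟩ := kamen
  cases coords with
  | nil => rfl
  | cons h t =>
    simp only [pvRecA, pvRecB, PySem.List.foldl_append_singleton_eq_map, List.nil_append]
    rw [PySem.List.foldl_prod_mk
          (f := fun (s : Int × Int) c =>
            (if PySem.List.pyGetD c 0 0 < s.1 then PySem.List.pyGetD c 0 0 else s.1,
             if s.2 < PySem.List.pyGetD c 0 0 then PySem.List.pyGetD c 0 0 else s.2))
          (g := fun (s : Int × Int) c =>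
            (if PySem.List.pyGetD c 1 0 < s.1 then PySem.List.pyGetD c 1 0 else s.1,
             if s.2 < PySem.List.pyGetD c 1 0 then PySem.List.pyGetD c 1 0 else s.2))]
    rw [PySem.List.foldl_prod_mk
          (f := fun (s : Int) c => if PySem.List.pyGetD c 0 0 < s then PySem.List.pyGetD c 0 0 else s)
          (g := fun (s : Int) c => if s < PySem.List.pyGetD c 0 0 then PySem.List.pyGetD c 0 0 else s)]
    rw [PySem.List.foldl_prod_mk
          (f := fun (s : Int) c => if PySem.List.pyGetD c 1 0 < s then PySem.List.pyGetD c 1 0 else s)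
          (g := fun (s : Int) c => if s < PySem.List.pyGetD c 1 0 then PySem.List.pyGetD c 1 0 else s)]
    simp only [List.foldl_cons, List.map_cons,
      PySem.List.min?_id_cons, PySem.List.max?_id_cons, Option.getD_some,
      pvFoldlIfLt (fun c => PySem.List.pyGetD c 0 0) t,
      pvFoldlIfGt (fun c => PySem.List.pyGetD c 0 0) t,
      pvFoldlIfLt (fun c => PySem.List.pyGetD c 1 0) t,
      pvFoldlIfGt (fun c => PySem.List.pyGetD c 1 0) t]
    simp [sub_eq_add_neg]

-- A's augmented list, abstractly: pair each record with its index starting at c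
def pvAug (ms : List (Int × List (List Int) × List Int)) (c : Int) :
    List ((Int × List (List Int) × List Int) × Int) :=
  match ms with
  | [] => []
  | m :: ms => (m, c) :: pvAug ms (c + 1)

theorem pvBuildA_eq (stones : List (Int × List (List Int)))
    (acc : List ((Int × List (List Int) × List Int) × Int)) (c : Int) :
    stones.foldl
      (fun (st : List ((Int × List (List Int) × List Int) × Int) × Int) kamen =>
        (st.1 ++ [(pvRecA kamen, st.2)], st.2 + 1)) (acc, c)
      = (acc ++ pvAug (stones.map pvRecA) c, c + stones.length) := by
  induction stones generalizing acc c with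
  | nil => simp [pvAug]
  | cons s t ih => simp [List.foldl_cons, ih, pvAug]; omega

theorem pvAug_eq_map_range (ms : List (Int × List (List Int) × List Int)) (c : Int) :
    pvAug ms c = (List.range ms.length).map (fun j => (ms.getD j pvDefRec, c + (j : Int))) := by
  induction ms generalizing c with
  | nil => simp [pvAug]
  | cons m t ih =>
    rw [pvAug, ih]
    simp only [List.length_cons, List.range_succ_eq_map, List.map_cons, List.map_map]
    congr 1
    · simp
    · refine List.map_congr_left (fun j _ => ?_)
      simp only [Function.comp, List.getD_cons_succ]
      congr 1
      push_cast; ring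

theorem pvAug_eq_map_pyRange (ms : List (Int × List (List Int) × List Int)) :
    pvAug ms 0 = (PySem.List.pyRange 0 (ms.length : Int) 1).map
      (fun i => (PySem.List.pyGetD ms i pvDefRec, i)) := by
  rw [pvAug_eq_map_range, PySem.List.pyRange_zero_natCast, List.map_map]
  refine List.map_congr_left (fun j _ => ?_)
  simp [PySem.List.pyGetD_natCast]

-- insertBy skips a block it is not 'before'
theorem pvInsertBy_append {α : Type} (before : α → α → Bool) (x : α) (l r : List α)
    (h : ∀ y ∈ l, before x y = false) :
    PySem.List.insertBy before x (l ++ r) = l ++ PySem.List.insertBy before x r := by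
  induction l with
  | nil => rfl
  | cons y ys ih =>
    simp only [List.cons_append, PySem.List.insertBy, h y (by simp), ih (fun z hz => h z (by simp [hz]))]
    simp

-- insertBy puts x in front when it is 'before' everything
theorem pvInsertBy_front {α : Type} (before : α → α → Bool) (x : α) (r : List α)
    (h : ∀ y ∈ r, before x y = true) :
    PySem.List.insertBy before x r = x :: r := by
  cases r with
  | nil => rfl
  | cons y ys => simp [PySem.List.insertBy, h y (by simp)]

-- inserting an element whose key is already present appends it to its bucket
theorem pvInsGroupOld {α : Type} (key : α → Int) (x : α) (D : List Int) (grp : Int → List α)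
    (hdesc : D.Pairwise (· > ·))
    (hkey : ∀ k ∈ D, ∀ y ∈ grp k, key y = k)
    (hmem : key x ∈ D) :
    PySem.List.insertBy (fun a b => decide (key b < key a)) x (D.flatMap grp)
      = D.flatMap (fun k => grp k ++ if key x == k then [x] else []) := by
  induction D with
  | nil => simp at hmem
  | cons k D' ih =>
    rw [List.pairwise_cons] at hdesc
    obtain ⟨hk, hdesc'⟩ := hdesc
    simp only [List.flatMap_cons]
    by_cases heq : key x = k
    · rw [pvInsertBy_append _ _ _ _ (fun y hy => by
        simp [hkey k (by simp) y hy, heq])]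
      rw [pvInsertBy_front _ _ _ (fun y hy => by
        obtain ⟨k', hk', hy'⟩ := List.mem_flatMap.mp hy
        simp only [hkey k' (by simp [hk']) y hy', heq, decide_eq_true_eq]
        exact hk k' hk')]
      have hrest : (D'.flatMap fun k' => grp k' ++ if key x == k' then [x] else [])
          = D'.flatMap grp := by
        refine List.flatMap_congr (fun k' hk' => ?_)
        have : key x ≠ k' := by have := hk k' hk'; omega
        simp [this]
      rw [hrest]
      simp [heq]
    · have hmem' : key x ∈ D' := by
        rcases List.mem_cons.mp hmem with h | h
        · exact absurd h heq
        · exact h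
      have hlt : key x < k := hk _ hmem'
      rw [pvInsertBy_append _ _ _ _ (fun y hy => by
        simp only [hkey k (by simp) y hy, decide_eq_false_iff_not]; omega)]
      rw [ih hdesc' (fun k' hk' y hy => hkey k' (by simp [hk']) y hy) hmem']
      simp [heq]

-- inserting an element with a fresh key inserts a fresh singleton bucket
theorem pvInsGroupNew {α : Type} (key : α → Int) (x : α) (D : List Int) (grp : Int → List α)
    (hdesc : D.Pairwise (· > ·))
    (hkey : ∀ k ∈ D, ∀ y ∈ grp k, key y = k)
    (hmem : key x ∉ D)
    (hnil : grp (key x) = []) :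
    PySem.List.insertBy (fun a b => decide (key b < key a)) x (D.flatMap grp)
      = (PySem.List.insertBy (fun a b => decide (b < a)) (key x) D).flatMap
          (fun k => grp k ++ if key x == k then [x] else []) := by
  induction D with
  | nil => simp [PySem.List.insertBy, hnil]
  | cons k D' ih =>
    rw [List.pairwise_cons] at hdesc
    obtain ⟨hk, hdesc'⟩ := hdesc
    have hneq : key x ≠ k := fun h => hmem (by simp [h])
    by_cases hlt : k < key x
    · rw [List.flatMap_cons, pvInsertBy_front _ _ _ (fun y hy => by
        rcases List.mem_append.mp hy with h | h
        · simp only [hkey k (by simp) y h, decide_eq_true_eq]; exact hlt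
        · obtain ⟨k', hk', hy'⟩ := List.mem_flatMap.mp h
          simp only [hkey k' (by simp [hk']) y hy', decide_eq_true_eq]
          have := hk k' hk'; omega)]
      have hins : PySem.List.insertBy (fun a b => decide (b < a)) (key x) (k :: D')
          = key x :: k :: D' := by
        simp [PySem.List.insertBy, hlt]
      rw [hins]
      simp only [List.flatMap_cons, hnil, beq_self_eq_true, if_true, List.nil_append]
      have h1 : key x ≠ k := hneq
      have hrest : (D'.flatMap fun k' => grp k' ++ if key x == k' then [x] else [])
          = D'.flatMap grp := by
        refine List.flatMap_congr (fun k' hk' => ?_)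
        have := hk k' hk'
        have : key x ≠ k' := by omega
        simp [this]
      rw [hrest]
      simp [h1]
    · have hgt : key x < k := lt_of_le_of_ne (not_lt.mp hlt) hneq
      rw [List.flatMap_cons, pvInsertBy_append _ _ _ _ (fun y hy => by
        simp only [hkey k (by simp) y hy, decide_eq_false_iff_not]; omega)]
      have hins : PySem.List.insertBy (fun a b => decide (b < a)) (key x) (k :: D')
          = k :: PySem.List.insertBy (fun a b => decide (b < a)) (key x) D' := by
        simp [PySem.List.insertBy]; omega
      rw [hins, ih hdesc' (fun k' hk' y hy => hkey k' (by simp [hk']) y hy)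
            (fun h => hmem (by simp [h]))]
      simp [hneq]

-- the reverse-sorted distinct-key list is strictly descending
theorem pvPairwiseGt (S : List Int) (hnd : S.Nodup) :
    (PySem.List.sorted S (fun k => k) true).Pairwise (· > ·) := by
  have h1 := PySem.List.sorted_pairwise_rev S (fun k => k)
  have h2 : (PySem.List.sorted S (fun k => k) true).Nodup :=
    ((PySem.List.sorted_perm S (fun k => k) true).nodup_iff).mpr hnd
  exact (h1.and h2).imp (fun {a b} h => lt_of_le_of_ne h.1 (Ne.symm h.2))

-- GROUPING: Python's stable reverse sort emits, for each distinct key in descending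
-- order, the elements with that key in their original order
theorem pvGroupSorted {α : Type} (key : α → Int) (xs : List α) :
    PySem.List.sorted xs key true
      = (PySem.List.sorted (PySem.Set.ofList (xs.map key)) (fun k => k) true).flatMap
          (fun k => xs.filter (fun x => key x == k)) := by
  induction xs using List.reverseRecOn with
  | nil => rfl
  | append_singleton p x ih =>
    rw [PySem.List.sorted_rev_eq_foldl_insertBy, List.foldl_append,
        ← PySem.List.sorted_rev_eq_foldl_insertBy, ih]
    simp only [List.foldl_cons, List.foldl_nil]
    have hset : PySem.Set.ofList ((p ++ [x]).map key)
        = PySem.Set.add (PySem.Set.ofList (p.map key)) (key x) := by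
      simp [PySem.Set.ofList_eq_foldl, List.foldl_append]
    have hkeyf : ∀ k ∈ PySem.List.sorted (PySem.Set.ofList (p.map key)) (fun k => k) true,
        ∀ y ∈ p.filter (fun z => key z == k), key y = k := by
      intro k _ y hy
      exact beq_iff_eq.mp (List.mem_filter.mp hy).2
    have hdesc := pvPairwiseGt _ (PySem.Set.nodup_ofList (p.map key))
    by_cases hmem : key x ∈ PySem.Set.ofList (p.map key)
    · have hadd : PySem.Set.add (PySem.Set.ofList (p.map key)) (key x)
          = PySem.Set.ofList (p.map key) := by
        simp only [PySem.Set.add, PySem.Set.contains]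
        rw [if_pos (by simpa using hmem)]
      rw [hset, hadd]
      rw [pvInsGroupOld key x _ _ hdesc hkeyf
            ((PySem.List.mem_sorted _ _ _ _).mpr hmem)]
      refine List.flatMap_congr (fun k _ => ?_)
      rcases eq_or_ne (key x) k with h | h
      · simp [List.filter_append, List.filter, h]
      · have hb : (key x == k) = false := by simp [h]
        simp [List.filter_append, List.filter, hb]
    · have hadd : PySem.Set.add (PySem.Set.ofList (p.map key)) (key x)
          = PySem.Set.ofList (p.map key) ++ [key x] := by
        simp only [PySem.Set.add, PySem.Set.contains]
        rw [if_neg (by simpa using hmem)]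
      have hnil : p.filter (fun z => key z == key x) = [] := by
        rw [List.filter_eq_nil_iff]
        intro y hy hbeq
        exact hmem ((PySem.Set.mem_ofList _ _).mpr
          (List.mem_map.mpr ⟨y, hy, beq_iff_eq.mp hbeq⟩))
      rw [hset, hadd]
      have hsortadd : PySem.List.sorted (PySem.Set.ofList (p.map key) ++ [key x]) (fun k => k) true
          = PySem.List.insertBy (fun a b => decide (b < a)) (key x)
              (PySem.List.sorted (PySem.Set.ofList (p.map key)) (fun k => k) true) := by
        rw [PySem.List.sorted_rev_eq_foldl_insertBy, List.foldl_append,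
            ← PySem.List.sorted_rev_eq_foldl_insertBy]
        simp
      rw [hsortadd]
      rw [pvInsGroupNew key x _ _ hdesc hkeyf
            (fun h => hmem ((PySem.List.mem_sorted _ _ _ _).mp h)) hnil]
      refine List.flatMap_congr (fun k _ => ?_)
      rcases eq_or_ne (key x) k with h | h
      · simp [List.filter_append, List.filter, h]
      · have hb : (key x == k) = false := by simp [h]
        simp [List.filter_append, List.filter, hb]

-- B's emission loop, closed form
theorem pvEmit {ρ : Type} (g : Int → List Int) (f : Int → ρ) (ks : List Int)
    (a : List ρ) (b : List Int) :
    ks.foldl (fun st k => (g k).foldl (fun st2 i => (st2.1 ++ [f i], st2.2 ++ [i])) st) (a, b)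
      = (a ++ ks.flatMap (fun k => (g k).map f), b ++ ks.flatMap g) := by
  induction ks generalizing a b with
  | nil => simp
  | cons k ks ih =>
    simp only [List.foldl_cons]
    rw [PySem.List.foldl_prod_mk (f := fun acc i => acc ++ [f i]) (g := fun acc i => acc ++ [i]),
        PySem.List.foldl_append_singleton_eq_map, PySem.List.foldl_append_singleton_eq_self, ih]
    simp

-- B in closed form: the sorted augmented list, projected
theorem pvAlt_closed (stones : List (Int × List (List Int))) (parameter : Int) :
    orderedStones_alt stones parameter
      = ((PySem.List.sorted (pvAug (stones.map pvRecB) 0)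
            (fun x => PySem.List.pyGetD x.1.2.2 parameter 0) true).map (fun x => x.1),
         (PySem.List.sorted (pvAug (stones.map pvRecB) 0)
            (fun x => PySem.List.pyGetD x.1.2.2 parameter 0) true).map (fun x => x.2)) := by
  unfold orderedStones_alt
  rw [PySem.List.foldl_append_singleton_eq_map]
  simp only [List.nil_append]
  set mv := stones.map pvRecB with hmv
  set G := (PySem.List.enumerate mv).foldl
    (fun (d : PySem.Dict Int (List Int)) p =>
      d.modify (PySem.List.pyGetD p.2.2.2 parameter 0) [] (· ++ [p.1])) PySem.Dict.empty with hG
  set pl := (PySem.List.enumerate mv).map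
    (fun (p : Int × (Int × List (List Int) × List Int)) =>
      (PySem.List.pyGetD p.2.2.2 parameter 0, p.1)) with hpl
  have hgetD : ∀ k, G.getD k []
      = (pl.filter (fun q => q.1 == k)).map (fun q => q.2) := by
    intro k
    rw [hG, ← List.foldl_map (f := fun (p : Int × (Int × List (List Int) × List Int)) =>
          (PySem.List.pyGetD p.2.2.2 parameter 0, p.1))
        (g := fun (d : PySem.Dict Int (List Int)) (q : Int × Int) =>
          d.modify q.1 [] (· ++ [q.2])),
        PySem.Dict.getD_foldl_modify_append, PySem.Dict.getD_empty, List.nil_append, hpl]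
  have hkeys : G.keys = PySem.Set.ofList
      ((PySem.List.enumerate mv).map (fun p => PySem.List.pyGetD p.2.2.2 parameter 0)) := by
    rw [hG, PySem.Dict.keys_foldl_modify_key (PySem.List.enumerate mv)
          (fun p => PySem.List.pyGetD p.2.2.2 parameter 0) []
          (fun _ p => (· ++ [p.1])) PySem.Dict.empty,
        PySem.Dict.keys_empty, PySem.Set.ofList_eq_foldl]
    rfl
  rw [pvEmit (g := fun k => G.getD k []) (f := fun i => PySem.List.pyGetD mv i pvDefRec)]
  simp only [List.nil_append]
  rw [pvGroupSorted (key := fun x : (Int × List (List Int) × List Int) × Int =>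
        PySem.List.pyGetD x.1.2.2 parameter 0) (pvAug mv 0)]
  rw [List.map_flatMap, List.map_flatMap]
  have hR := pvAug_eq_map_pyRange mv
  have hEnum : PySem.List.enumerate mv = (PySem.List.pyRange 0 (mv.length : Int) 1).map
      (fun i => (i, PySem.List.pyGetD mv i pvDefRec)) := by
    rw [PySem.List.enumerate_eq_map_pyRange mv pvDefRec]; rfl
  have hplR : pl = (PySem.List.pyRange 0 (mv.length : Int) 1).map
      (fun i => (PySem.List.pyGetD (PySem.List.pyGetD mv i pvDefRec).2.2 parameter 0, i)) := by
    rw [hpl, hEnum, List.map_map]; rfl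
  have hkeyseq : ((PySem.List.enumerate mv).map (fun p => PySem.List.pyGetD p.2.2.2 parameter 0))
      = (pvAug mv 0).map (fun x => PySem.List.pyGetD x.1.2.2 parameter 0) := by
    rw [hEnum, hR, List.map_map, List.map_map]; rfl
  rw [hkeys, hkeyseq]
  refine Prod.ext ?_ ?_
  · refine List.flatMap_congr (fun k _ => ?_)
    rw [hgetD k, hplR, hR, List.filter_map, List.filter_map]
    simp only [List.map_map, Function.comp_def]
  · refine List.flatMap_congr (fun k _ => ?_)
    rw [hgetD k, hplR, hR, List.filter_map, List.filter_map]
    simp only [List.map_map, Function.comp_def]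

-- the main equality
theorem orderedStones_eq_alt (stones : List (Int × List (List Int))) (parameter : Int) :
    orderedStones stones parameter = orderedStones_alt stones parameter := by
  rw [pvAlt_closed]
  unfold orderedStones
  rw [pvBuildA_eq, pvRecA_eq_pvRecB]
  simp only [List.nil_append]

-- ===== VERDICT (by name: the statement is the Claim_ definition above) =====
theorem orderedStones_spec : Claim_equal_orderedStones := by
  intro stones parameter _ _
  unfold Spec_orderedStones
  exact orderedStones_eq_alt stones parameter
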